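-- pv_equiv track=rewrite | github.com/Idonot-Grief/lumadep | core/java.py | _resolve_version
-- ===== SOURCE A (Python) =====
-- _VERSION_FALLBACK = {16: 17, 18: 21, 19: 21, 20: 21, 25: 21, 26: 21}
--
-- def _resolve_version(version: int) -> int:
--     """Map to the nearest version we have a download for."""
--     supported = [8, 17, 21]
--     if version in supported:
--         return version
--     if version in _VERSION_FALLBACK:
--         return _VERSION_FALLBACK[version]
--     # pick the smallest supported version that is >= requested
--     for v in sorted(supported):
--         if v >= version:
--             return v
--     return supported[-1]
-- ===== SOURCE B (Python) =====
-- def _resolve_version(version: int) -> int: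
--     """Map to the nearest version we have a download for."""
--     # closed-form threshold chain: smallest supported >= version, else the largest (21)
--     return 8 if version <= 8 else 17 if version <= 17 else 21
-- ===== Notes on version B (the rewrite author's own statement) =====
-- stated objective: simpler
-- what changed: Replaced the membership test, the redundant _VERSION_FALLBACK dict lookup and the linear scan over sorted(supported) with a single closed-form threshold chain (<=8 -> 8, <=17 -> 17, else 21), which is provably the same mapping.
import Mathlib
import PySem

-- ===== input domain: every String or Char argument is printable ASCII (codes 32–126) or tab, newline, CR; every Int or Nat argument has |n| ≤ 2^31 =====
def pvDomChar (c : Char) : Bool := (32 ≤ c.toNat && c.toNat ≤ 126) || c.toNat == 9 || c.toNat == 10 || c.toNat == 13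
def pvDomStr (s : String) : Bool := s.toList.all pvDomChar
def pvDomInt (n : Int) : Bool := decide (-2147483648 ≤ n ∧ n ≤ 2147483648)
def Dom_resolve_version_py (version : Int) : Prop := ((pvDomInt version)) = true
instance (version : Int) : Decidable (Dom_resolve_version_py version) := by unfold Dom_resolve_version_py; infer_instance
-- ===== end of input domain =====

-- ===== PORT A =====
-- A: membership test, fallback-dict lookup, then early-return scan over sorted(supported)
def pvVersionFallback : PySem.Dict Int Int :=
  PySem.Dict.ofList [(16, 17), (18, 21), (19, 21), (20, 21), (25, 21), (26, 21)]

def resolve_version_py (version : Int) : Int :=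
  let supported : List Int := [8, 17, 21]
  if supported.contains version then version
  else
    match pvVersionFallback.get? version with
    | some v => v
    | none =>
      -- for v in sorted(supported): if v >= version: return v  (early-return scan)
      match (PySem.List.sorted supported (fun x => x) false).find? (fun v => version ≤ v) with
      | some v => v
      | none => (PySem.List.pyGet? supported (-1)).getD 0

-- ===== PORT B =====
-- B: closed-form threshold chain (header: simpler — no dict, no scan)
def resolve_version_py_alt (version : Int) : Int :=
  if version ≤ 8 then 8 else if version ≤ 17 then 17 else 21

-- ===== PRECONDITION & SPEC =====
def Spec_resolve_version_py (version : Int) (out : Int) : Prop := out = resolve_version_py_alt version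
instance (version : Int) (out : Int) : Decidable (Spec_resolve_version_py version out) := by unfold Spec_resolve_version_py; infer_instance

-- ===== CLAIM (what is proved, stated in full; the proofs are below) =====
def Claim_equal_resolve_version_py : Prop := ∀ (version : Int), Dom_resolve_version_py version → Spec_resolve_version_py version (resolve_version_py version)

-- ===== LEMMAS AND PROOFS =====

-- ===== VERDICT (by name: the statement is the Claim_ definition above) =====
theorem resolve_version_py_spec : Claim_equal_resolve_version_py := by
  intro version _
  by_cases e1 : version = 8;  · subst e1; decide
  by_cases e2 : version = 17; · subst e2; decide
  by_cases e3 : version = 21; · subst e3; decide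
  by_cases e4 : version = 16; · subst e4; decide
  by_cases e5 : version = 18; · subst e5; decide
  by_cases e6 : version = 19; · subst e6; decide
  by_cases e7 : version = 20; · subst e7; decide
  by_cases e8 : version = 25; · subst e8; decide
  by_cases e9 : version = 26; · subst e9; decide
  unfold Spec_resolve_version_py resolve_version_py resolve_version_py_alt pvVersionFallback
  simp only [PySem.Dict.ofList, PySem.Dict.empty, PySem.Dict.update, PySem.Dict.insert,
    PySem.Dict.get?, PySem.Dict.contains, PySem.List.sorted,
    List.contains_cons, List.contains_nil, beq_iff_eq]
  have b4 : ((16:Int) == version) = false := by simp; omega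
  have b5 : ((18:Int) == version) = false := by simp; omega
  have b6 : ((19:Int) == version) = false := by simp; omega
  have b7 : ((20:Int) == version) = false := by simp; omega
  have b8 : ((25:Int) == version) = false := by simp; omega
  have b9 : ((26:Int) == version) = false := by simp; omega
  simp [e1, e2, e3, b4, b5, b6, b7, b8, b9, List.find?, PySem.List.insertBy, PySem.List.pyGet?,
    PySem.List.pyIdx?]
  by_cases h1 : version ≤ 8 <;> by_cases h2 : version ≤ 17 <;> by_cases h3 : version ≤ 21 <;>
    simp [h1, h2, h3]
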